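-- pv_equiv track=rewrite | github.com/iamerroralpha/MyCodewars | Codewars/DeleteAllOfThisBut.py | DeleteAllOFThisBut
-- ===== SOURCE A (Python) =====
-- def DeleteAllOFThisBut(TheOnesToDelete ,ConserveThisMany, Array):
--     OverridenElements = 0
--     Index = 0
--     for elements in Array:
--         if (TheOnesToDelete == elements):
--             OverridenElements = OverridenElements + 1
--             if (OverridenElements > ConserveThisMany):
--                 Array.pop(Index)
--                 return DeleteAllOFThisBut(TheOnesToDelete ,ConserveThisMany, Array)
--         Index = Index + 1
--     return Array
-- ===== SOURCE B (Python) =====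
-- def DeleteAllOFThisBut(TheOnesToDelete, ConserveThisMany, Array):
--     kept = 0
--     write = 0
--     for x in Array:
--         if x == TheOnesToDelete:
--             if kept >= ConserveThisMany:
--                 continue
--             kept += 1
--         Array[write] = x
--         write += 1
--     del Array[write:]
--     return Array
-- ===== Notes on version B (the rewrite author's own statement) =====
-- stated objective: simpler
-- what changed: A repeatedly rescans the list from the start and recurses once per deleted element; B is a single in-place compaction pass with a write index that truncates the tail, with no recursion.
import Mathlib
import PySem

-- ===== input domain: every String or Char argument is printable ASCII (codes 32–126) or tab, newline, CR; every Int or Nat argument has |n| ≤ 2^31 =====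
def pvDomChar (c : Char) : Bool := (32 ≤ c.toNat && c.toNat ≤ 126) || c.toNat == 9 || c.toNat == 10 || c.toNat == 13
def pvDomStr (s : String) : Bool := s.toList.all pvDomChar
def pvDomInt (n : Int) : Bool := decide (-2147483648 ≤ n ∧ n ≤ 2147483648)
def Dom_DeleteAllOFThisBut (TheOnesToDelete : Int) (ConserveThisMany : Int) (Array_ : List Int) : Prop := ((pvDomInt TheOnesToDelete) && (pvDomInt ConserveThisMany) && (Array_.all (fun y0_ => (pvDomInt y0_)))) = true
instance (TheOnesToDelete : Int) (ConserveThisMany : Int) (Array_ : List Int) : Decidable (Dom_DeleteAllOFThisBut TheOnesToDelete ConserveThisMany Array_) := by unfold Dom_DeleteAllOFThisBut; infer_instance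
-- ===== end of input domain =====

-- B replaces A's scan-pop-recurse loop by a single in-place compaction pass (simpler: one pass, no recursion).
-- Both Pythons mutate the argument list in place and return the same object; the equivalence
-- proved here is about the return value.

-- ===== PORT A =====
-- A's for-loop body: scan `rem` keeping the occurrence counter `ov` and position `idx`;
-- return the index at which A pops, or none if the loop finishes.
def pvScanA (t c ov idx : Int) (rem : List Int) : Option Int :=
  match rem with
  | [] => none
  | e :: rest =>
    if t == e then
      if ov + 1 > c then some idx
      else pvScanA t c (ov + 1) (idx + 1) rest
    else pvScanA t c ov (idx + 1) rest

def DeleteAllOFThisBut (TheOnesToDelete : Int) (ConserveThisMany : Int) (Array_ : List Int) : List Int :=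
  match pvScanA TheOnesToDelete ConserveThisMany 0 0 Array_ with
  | none => Array_
  | some i =>
    match h : PySem.List.pop? Array_ i with
    | none => Array_   -- unreachable: the scan only returns in-range indices (IndexError never happens)
    | some r => DeleteAllOFThisBut TheOnesToDelete ConserveThisMany r.2
termination_by Array_.length
decreasing_by
  have := PySem.List.length_of_pop?_eq_some Array_ h
  omega

-- ===== PORT B =====
-- B's single pass: walk the list with the `kept` counter, emitting the kept elements in order
-- (the compacted prefix that Python B writes in place).
def pvGoB (t c kept : Int) (rem : List Int) : List Int :=
  match rem with
  | [] => []
  | x :: rest =>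
    if x == t then
      if kept ≥ c then pvGoB t c kept rest
      else x :: pvGoB t c (kept + 1) rest
    else x :: pvGoB t c kept rest

def DeleteAllOFThisBut_alt (TheOnesToDelete : Int) (ConserveThisMany : Int) (Array_ : List Int) : List Int :=
  pvGoB TheOnesToDelete ConserveThisMany 0 Array_

-- ===== PRECONDITION & SPEC =====
def Spec_DeleteAllOFThisBut (TheOnesToDelete : Int) (ConserveThisMany : Int) (Array_ : List Int) (out : List Int) : Prop := out = DeleteAllOFThisBut_alt TheOnesToDelete ConserveThisMany Array_
instance (TheOnesToDelete : Int) (ConserveThisMany : Int) (Array_ : List Int) (out : List Int) : Decidable (Spec_DeleteAllOFThisBut TheOnesToDelete ConserveThisMany Array_ out) := by unfold Spec_DeleteAllOFThisBut; infer_instance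

-- ===== CLAIM (what is proved, stated in full; the proofs are below) =====
def Claim_equal_DeleteAllOFThisBut : Prop := ∀ (TheOnesToDelete : Int) (ConserveThisMany : Int) (Array_ : List Int), Dom_DeleteAllOFThisBut TheOnesToDelete ConserveThisMany Array_ → Spec_DeleteAllOFThisBut TheOnesToDelete ConserveThisMany Array_ (DeleteAllOFThisBut TheOnesToDelete ConserveThisMany Array_)

-- ===== LEMMAS AND PROOFS =====

-- If A's scan finishes without finding an index to pop, B keeps every element.
lemma pvScanA_none (t c : Int) : ∀ (rem : List Int) (ov idx : Int),
    pvScanA t c ov idx rem = none → pvGoB t c ov rem = rem := by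
  intro rem
  induction rem with
  | nil => intro ov idx _; rfl
  | cons x rest ih =>
    intro ov idx h
    rw [pvScanA] at h
    rw [pvGoB]
    by_cases hx : t = x
    · subst hx
      rw [if_pos (by simp)] at h
      by_cases hc : ov + 1 > c
      · rw [if_pos hc] at h; exact absurd h (by simp)
      · rw [if_neg hc] at h
        have hk : ¬ ov ≥ c := by omega
        rw [if_pos (by simp), if_neg hk, ih (ov + 1) (idx + 1) h]
    · have hbx : (t == x) = false := by simpa using hx
      have hbx' : (x == t) = false := by simpa using (Ne.symm hx)
      rw [hbx] at h; simp only [Bool.false_eq_true, if_false] at h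
      rw [hbx']; simp only [Bool.false_eq_true, if_false]
      rw [ih ov (idx + 1) h]

-- If A's scan returns an index, it is in range, and erasing that element does not change B's output.
lemma pvScanA_some (t c : Int) : ∀ (rem : List Int) (ov : Int) (k : Nat) (i : Int),
    pvScanA t c ov (k : Int) rem = some i →
    ∃ j : Nat, i = ((k + j : Nat) : Int) ∧ j < rem.length ∧
      pvGoB t c ov (rem.eraseIdx j) = pvGoB t c ov rem := by
  intro rem
  induction rem with
  | nil => intro ov k i h; simp [pvScanA] at h
  | cons x rest ih =>
    intro ov k i h
    rw [pvScanA] at h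
    by_cases hx : t = x
    · subst hx
      rw [if_pos (by simp)] at h
      by_cases hc : ov + 1 > c
      · rw [if_pos hc] at h
        have hik := Option.some.inj h
        refine ⟨0, by simp [← hik], by simp, ?_⟩
        have hk : ov ≥ c := by omega
        simp [pvGoB, hk]
      · rw [if_neg hc] at h
        have h' : pvScanA t c (ov + 1) ((k + 1 : Nat) : Int) rest = some i := by
          have hcast : ((k : Int) + 1) = ((k + 1 : Nat) : Int) := by push_cast; ring
          rwa [hcast] at h
        obtain ⟨j, hij, hjl, hgo⟩ := ih (ov + 1) (k + 1) i h'
        refine ⟨j + 1, by rw [hij]; congr 1; omega, by simp; omega, ?_⟩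
        have hk : ¬ ov ≥ c := by omega
        simp only [List.eraseIdx_cons_succ, pvGoB]
        have htt : (t == t) = true := by simp
        rw [if_pos htt, if_pos htt, if_neg hk, if_neg hk, hgo]
    · have hbx : (t == x) = false := by simpa using hx
      have hbx' : (x == t) = false := by simpa using (Ne.symm hx)
      rw [hbx] at h; simp only [Bool.false_eq_true, if_false] at h
      have h' : pvScanA t c ov ((k + 1 : Nat) : Int) rest = some i := by
        have hcast : ((k : Int) + 1) = ((k + 1 : Nat) : Int) := by push_cast; ring
        rwa [hcast] at h
      obtain ⟨j, hij, hjl, hgo⟩ := ih ov (k + 1) i h'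
      refine ⟨j + 1, by rw [hij]; congr 1; omega, by simp; omega, ?_⟩
      simp only [List.eraseIdx_cons_succ, pvGoB]
      rw [hbx']; simp only [Bool.false_eq_true, if_false]
      rw [hgo]

lemma A_eq_B (t c : Int) (xs : List Int) :
    DeleteAllOFThisBut t c xs = pvGoB t c 0 xs := by
  suffices h : ∀ n (xs : List Int), xs.length ≤ n → DeleteAllOFThisBut t c xs = pvGoB t c 0 xs from
    h xs.length xs le_rfl
  intro n
  induction n with
  | zero =>
    intro xs hl
    have hnil : xs = [] := by cases xs <;> simp_all
    subst hnil
    rw [DeleteAllOFThisBut.eq_def]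
    rfl
  | succ n ihn =>
    intro xs hl
    rw [DeleteAllOFThisBut.eq_def]
    split
    next hscan =>
      exact (pvScanA_none t c xs 0 0 hscan).symm
    next i hscan =>
      have h0 : pvScanA t c 0 ((0 : Nat) : Int) xs = some i := by simpa using hscan
      obtain ⟨j, hij, hjl, hgo⟩ := pvScanA_some t c xs 0 0 i h0
      have hi : i = (j : Int) := by simpa using hij
      subst hi
      have hpop : PySem.List.pop? xs (j : Int) = some (xs[j]'hjl, xs.eraseIdx j) :=
        PySem.List.pop?_natCast xs j hjl
      split
      next hnone => rw [hpop] at hnone; cases hnone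
      next r hr =>
        rw [hpop] at hr
        obtain rfl := Option.some.inj hr
        have hlen : (xs.eraseIdx j).length ≤ n := by
          have := List.length_eraseIdx_of_lt hjl
          omega
        rw [ihn (xs.eraseIdx j) hlen, hgo]

-- ===== VERDICT (by name: the statement is the Claim_ definition above) =====
theorem DeleteAllOFThisBut_spec : Claim_equal_DeleteAllOFThisBut := by
  intro t c xs _
  unfold Spec_DeleteAllOFThisBut DeleteAllOFThisBut_alt
  exact A_eq_B t c xs
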